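-- pv_equiv track=rewrite | github.com/OpenCTI-Platform/connectors | import-file-pdf-observables/src/reportimporter/report_parser.py | _defang
-- ===== SOURCE A (Python) =====
-- def _defang(value: str) -> str:
--     defang_types = [
--         ("[.]", "."),
--         ("hxxx://", "http://"),
--         ("hxxp://", "http://"),
--         ("hxxxx://", "https://"),
--         ("hxxps://", "https://"),
--         ("hxxxs://", "https://"),
--     ]
--
--     for defang_type in defang_types:
--         if defang_type[0] in value:
--             value = value.replace(defang_type[0], defang_type[1])
--
--     return value
-- ===== SOURCE B (Python) =====
-- def _defang(value: str) -> str: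
--     # single left-to-right pass over a token table instead of six sequential full-string replaces
--     mapping = {
--         "[.]": ".",
--         "hxxx://": "http://",
--         "hxxp://": "http://",
--         "hxxxx://": "https://",
--         "hxxps://": "https://",
--         "hxxxs://": "https://",
--     }
--     out = []
--     i = 0
--     n = len(value)
--     while i < n:
--         for tok, real in mapping.items():
--             if value.startswith(tok, i):
--                 out.append(real)
--                 i += len(tok)
--                 break
--         else:
--             out.append(value[i])
--             i += 1
--     return "".join(out)
-- ===== Notes on version B (the rewrite author's own statement) =====
-- stated objective: alternative
-- what changed: A runs six sequential full-string replace passes (one per defang token); B makes a single left-to-right scan that at each position consults a defang-token-to-real-form table, emitting the replacement and skipping the token, or copying the character.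
import Mathlib
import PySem

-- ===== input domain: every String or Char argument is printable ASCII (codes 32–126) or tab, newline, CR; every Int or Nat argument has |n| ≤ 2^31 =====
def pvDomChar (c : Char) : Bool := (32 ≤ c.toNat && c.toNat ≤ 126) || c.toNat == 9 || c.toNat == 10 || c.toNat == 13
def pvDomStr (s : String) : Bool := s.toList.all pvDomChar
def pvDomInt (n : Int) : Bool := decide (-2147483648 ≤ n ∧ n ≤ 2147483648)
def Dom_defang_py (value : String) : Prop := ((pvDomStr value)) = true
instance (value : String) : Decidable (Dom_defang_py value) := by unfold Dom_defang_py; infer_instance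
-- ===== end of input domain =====

-- B replaces A's six sequential full-string replace passes by one left-to-right scan
-- driven by a defang→real token table (objective: alternative single-pass algorithm).

-- ===== PORT A =====
def pvDefangTypes : List (String × String) :=
  [("[.]", "."), ("hxxx://", "http://"), ("hxxp://", "http://"),
   ("hxxxx://", "https://"), ("hxxps://", "https://"), ("hxxxs://", "https://")]

def defang_py (value : String) : String :=
  pvDefangTypes.foldl
    (fun v dt => if PySem.Str.isIn dt.1 v then PySem.Str.replace v dt.1 dt.2 else v) value

-- ===== PORT B =====
def pvMapping : List (List Char × List Char) :=
  [("[.]".toList, ".".toList),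
   ("hxxx://".toList, "http://".toList),
   ("hxxp://".toList, "http://".toList),
   ("hxxxx://".toList, "https://".toList),
   ("hxxps://".toList, "https://".toList),
   ("hxxxs://".toList, "https://".toList)]

-- termination helper for pvScan: every token in the table is nonempty
lemma pvTok_pos {l tok rep : List Char}
    (h : pvMapping.find? (fun p => p.1.isPrefixOf l) = some (tok, rep)) : 0 < tok.length := by
  have hm := List.mem_of_find?_eq_some h
  simp only [pvMapping, List.mem_cons, List.not_mem_nil, or_false, Prod.mk.injEq] at hm
  rcases hm with ⟨h1, _⟩ | ⟨h1, _⟩ | ⟨h1, _⟩ | ⟨h1, _⟩ | ⟨h1, _⟩ | ⟨h1, _⟩ <;> subst h1 <;> decide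

-- B: one left-to-right pass; at each position try the table's tokens in order
def pvScan : List Char → List Char
  | [] => []
  | c :: t =>
    match h : pvMapping.find? (fun p => p.1.isPrefixOf (c :: t)) with
    | some (tok, rep) => rep ++ pvScan ((c :: t).drop tok.length)
    | none => c :: pvScan t
  termination_by l => l.length
  decreasing_by
  · have := pvTok_pos h
    simp only [List.length_drop, List.length_cons]
    omega
  · simp

def defang_py_alt (value : String) : String := String.ofList (pvScan value.toList)

-- ===== PRECONDITION & SPEC =====
def Spec_defang_py (value : String) (out : String) : Prop := out = defang_py_alt value
instance (value : String) (out : String) : Decidable (Spec_defang_py value out) := by unfold Spec_defang_py; infer_instance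

-- ===== CLAIM (what is proved, stated in full; the proofs are below) =====
def Claim_equal_defang_py : Prop := ∀ (value : String), Dom_defang_py value → Spec_defang_py value (defang_py value)

-- ===== LEMMAS AND PROOFS =====

-- replace-all with a nonempty pattern o0 :: orest, as a plain structural scan
def pvRep (o0 : Char) (orest new : List Char) : List Char → List Char
  | [] => []
  | c :: t =>
    if (o0 :: orest).isPrefixOf (c :: t) then
      new ++ pvRep o0 orest new ((c :: t).drop (orest.length + 1))
    else c :: pvRep o0 orest new t
  termination_by l => l.length
  decreasing_by
  · simp only [List.length_drop, List.length_cons]; omega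
  · simp

lemma pvRep_nil (o0 : Char) (orest new : List Char) : pvRep o0 orest new [] = [] := by
  simp [pvRep]

lemma pvRep_pos (o0 : Char) (orest new u : List Char) :
    pvRep o0 orest new ((o0 :: orest) ++ u) = new ++ pvRep o0 orest new u := by
  rw [List.cons_append, pvRep]
  rw [if_pos (List.isPrefixOf_iff_prefix.mpr (by simpa using List.prefix_append _ u))]
  congr 1
  rw [show ((o0 :: (orest ++ u)).drop (orest.length + 1)) = u from by
    simpa using List.drop_left (l₁ := o0 :: orest) (l₂ := u)]

lemma pvRep_neg (o0 : Char) (orest new : List Char) (c : Char) (t : List Char)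
    (h : ¬ (o0 :: orest) <+: (c :: t)) :
    pvRep o0 orest new (c :: t) = c :: pvRep o0 orest new t := by
  rw [pvRep, if_neg (by simpa [List.isPrefixOf_iff_prefix] using h)]

lemma pvRep_id (o0 : Char) (orest new : List Char) :
    ∀ s, ¬ (o0 :: orest) <:+: s → pvRep o0 orest new s = s
  | [], _ => by simp [pvRep]
  | c :: t, h => by
    rw [pvRep_neg _ _ _ _ _ (fun hp => h hp.isInfix)]
    rw [pvRep_id o0 orest new t (fun hi => h (List.infix_cons hi))]

-- PySem's replace.go with enough fuel computes pvRep
lemma pvGo_eq (o0 : Char) (orest new : List Char) :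
    ∀ fuel l acc, l.length ≤ fuel →
      PySem.Chars.replace.go (o0 :: orest) new fuel l acc = acc.reverse ++ pvRep o0 orest new l := by
  intro fuel
  induction fuel with
  | zero =>
    intro l acc hl
    have : l = [] := List.eq_nil_of_length_eq_zero (Nat.le_zero.mp hl)
    subst this
    rw [PySem.Chars.replace.go]
    simp [pvRep]
  | succ n ih =>
    intro l acc hl
    match l with
    | [] =>
      rw [PySem.Chars.replace.go]
      · simp [pvRep]
      · omega
    | c :: t =>
      rw [PySem.Chars.replace.go]
      by_cases hp : (o0 :: orest).isPrefixOf (c :: t)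
      · rw [if_pos hp]
        rw [ih _ _ (by simp at hl ⊢; omega)]
        rw [pvRep, if_pos hp]
        simp
      · rw [if_neg hp]
        rw [ih _ _ (by simp at hl ⊢; omega)]
        rw [pvRep, if_neg hp]
        simp

lemma pvReplace_eq (o0 : Char) (orest new s : List Char) :
    PySem.Chars.replace s (o0 :: orest) new = pvRep o0 orest new s := by
  rw [PySem.Chars.replace]
  rw [if_neg (by simp)]
  simpa using pvGo_eq o0 orest new s.length s [] le_rfl

-- "no occurrence of old can start inside blk", whatever follows blk
def pvNoOcc (old blk : List Char) : Prop :=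
  ∀ k, k < blk.length → ∀ v, ¬ old <+: (blk.drop k ++ v)

-- decidable sufficient check: a mismatch strictly inside blk at every start position k
def pvChk (old blk : List Char) : Bool :=
  (List.range blk.length).all fun k =>
    (List.range (min old.length (blk.length - k))).any fun m => blk[k+m]? != old[m]?

lemma pvChk_sound {old blk : List Char} (h : pvChk old blk = true) : pvNoOcc old blk := by
  intro k hk v hpre
  have hk' := (List.all_eq_true.mp h) k (List.mem_range.mpr hk)
  obtain ⟨m, hm, hne⟩ := List.any_eq_true.mp hk'
  have hm' := List.mem_range.mp hm
  have hmo : m < old.length := by omega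
  have hmb : m < blk.length - k := by omega
  have h1 : old[m] = (blk.drop k ++ v)[m]'(by
      simp only [List.length_append, List.length_drop]; omega) := hpre.getElem hmo
  have h2 : (blk.drop k ++ v)[m]'(by
      simp only [List.length_append, List.length_drop]; omega) = blk[k+m]'(by omega) := by
    rw [List.getElem_append_left (by simp only [List.length_drop]; omega)]
    exact List.getElem_drop
  rw [h2] at h1
  have : blk[k+m]? = old[m]? := by
    rw [List.getElem?_eq_getElem (by omega), List.getElem?_eq_getElem hmo, h1]
  simp [this] at hne

lemma pvNoOcc_tail {old : List Char} {c : Char} {b : List Char}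
    (h : pvNoOcc old (c :: b)) : pvNoOcc old b := by
  intro k hk v
  have := h (k+1) (by simp; omega) v
  simpa using this

lemma pvRep_block (o0 : Char) (orest new : List Char) :
    ∀ {blk : List Char}, pvNoOcc (o0 :: orest) blk →
    ∀ s, pvRep o0 orest new (blk ++ s) = blk ++ pvRep o0 orest new s := by
  intro blk
  induction blk with
  | nil => intro _ s; simp
  | cons c b ih =>
    intro hno s
    have h0 : ¬ (o0 :: orest) <+: ((c :: b) ++ s) := by
      have := hno 0 (by simp) s
      simpa using this
    rw [List.cons_append, pvRep_neg _ _ _ _ _ (by simpa using h0)]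
    rw [ih (pvNoOcc_tail hno) s]
    simp

-- replacing cannot create a fresh occurrence of w at the head when new's first char avoids w
lemma pvRep_noCreate_aux (o0 : Char) (orest : List Char) (n0 : Char) (nrest : List Char) :
    ∀ n s w, s.length ≤ n → w ≠ [] → n0 ∉ w → ¬ w <+: s →
      ¬ w <+: pvRep o0 orest (n0 :: nrest) s := by
  intro n
  induction n with
  | zero =>
    intro s w hl hw _ hnp
    have : s = [] := List.eq_nil_of_length_eq_zero (Nat.le_zero.mp hl)
    subst this
    simp only [pvRep]
    intro hcon
    exact hw (List.prefix_nil.mp hcon)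
  | succ n ih =>
    intro s w hl hw hn0 hnp
    match s with
    | [] =>
      simp only [pvRep]
      intro hcon
      exact hw (List.prefix_nil.mp hcon)
    | c :: t =>
      by_cases hp : (o0 :: orest).isPrefixOf (c :: t)
      · rw [pvRep, if_pos hp]
        intro hcon
        match w with
        | a :: w' =>
          rw [List.cons_append] at hcon
          have := (List.cons_prefix_cons.mp hcon).1
          subst this
          exact hn0 List.mem_cons_self
      · rw [pvRep, if_neg hp]
        intro hcon
        match w with
        | a :: w' =>
          obtain ⟨rfl, hw'⟩ := List.cons_prefix_cons.mp hcon
          match w' with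
          | [] => exact hnp (List.cons_prefix_cons.mpr ⟨rfl, List.nil_prefix⟩)
          | b :: w'' =>
            have hnp' : ¬ (b :: w'') <+: t := fun hx =>
              hnp (List.cons_prefix_cons.mpr ⟨rfl, hx⟩)
            exact ih t (b :: w'') (by simp at hl ⊢; omega) (by simp)
              (fun hx => hn0 (List.mem_cons_of_mem _ hx)) hnp' hw'

lemma pvRep_noCreate (o0 : Char) (orest : List Char) (n0 : Char) (nrest : List Char) :
    ∀ s w, w ≠ [] → n0 ∉ w → ¬ w <+: s → ¬ w <+: pvRep o0 orest (n0 :: nrest) s :=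
  fun s w => pvRep_noCreate_aux o0 orest n0 nrest s.length s w le_rfl

-- equations for pvScan
lemma pvScan_nil : pvScan [] = [] := by rw [pvScan]

lemma pvScan_some {c : Char} {t tok rep : List Char}
    (h : pvMapping.find? (fun p => p.1.isPrefixOf (c :: t)) = some (tok, rep)) :
    pvScan (c :: t) = rep ++ pvScan ((c :: t).drop tok.length) := by
  rw [pvScan]
  split
  · rename_i tok' rep' h'
    rw [h] at h'
    cases h'
    rfl
  · rename_i h'
    rw [h] at h'
    cases h'

lemma pvScan_none {c : Char} {t : List Char}
    (h : pvMapping.find? (fun p => p.1.isPrefixOf (c :: t)) = none) :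
    pvScan (c :: t) = c :: pvScan t := by
  rw [pvScan]
  split
  · rename_i tok' rep' h'
    rw [h] at h'
    cases h'
  · rfl

lemma pvMapping_lit : pvMapping =
  [(['[','.',']'], ['.']),
   (['h','x','x','x',':','/','/'], ['h','t','t','p',':','/','/']),
   (['h','x','x','p',':','/','/'], ['h','t','t','p',':','/','/']),
   (['h','x','x','x','x',':','/','/'], ['h','t','t','p','s',':','/','/']),
   (['h','x','x','p','s',':','/','/'], ['h','t','t','p','s',':','/','/']),
   (['h','x','x','x','s',':','/','/'], ['h','t','t','p','s',':','/','/'])] := by decide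

def pvChain (s : List Char) : List Char :=
  pvRep 'h' ['x','x','x','s',':','/','/'] ['h','t','t','p','s',':','/','/']
      (pvRep 'h' ['x','x','p','s',':','/','/'] ['h','t','t','p','s',':','/','/']
      (pvRep 'h' ['x','x','x','x',':','/','/'] ['h','t','t','p','s',':','/','/']
      (pvRep 'h' ['x','x','p',':','/','/'] ['h','t','t','p',':','/','/']
      (pvRep 'h' ['x','x','x',':','/','/'] ['h','t','t','p',':','/','/']
      (pvRep '[' ['.',']'] ['.'] s)))))

lemma pvChain_tok1 (u : List Char) :
    pvChain (['[','.',']'] ++ u) = ['.'] ++ pvChain u := by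
  unfold pvChain
  rw [pvRep_pos '[' ['.',']'] ['.'] _]
  rw [pvRep_block 'h' ['x','x','x',':','/','/'] ['h','t','t','p',':','/','/'] (blk := ['.']) (pvChk_sound (by decide)) _]
  rw [pvRep_block 'h' ['x','x','p',':','/','/'] ['h','t','t','p',':','/','/'] (blk := ['.']) (pvChk_sound (by decide)) _]
  rw [pvRep_block 'h' ['x','x','x','x',':','/','/'] ['h','t','t','p','s',':','/','/'] (blk := ['.']) (pvChk_sound (by decide)) _]
  rw [pvRep_block 'h' ['x','x','p','s',':','/','/'] ['h','t','t','p','s',':','/','/'] (blk := ['.']) (pvChk_sound (by decide)) _]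
  rw [pvRep_block 'h' ['x','x','x','s',':','/','/'] ['h','t','t','p','s',':','/','/'] (blk := ['.']) (pvChk_sound (by decide)) _]

lemma pvChain_tok2 (u : List Char) :
    pvChain (['h','x','x','x',':','/','/'] ++ u) = ['h','t','t','p',':','/','/'] ++ pvChain u := by
  unfold pvChain
  rw [pvRep_block '[' ['.',']'] ['.'] (blk := ['h','x','x','x',':','/','/']) (pvChk_sound (by decide)) _]
  rw [pvRep_pos 'h' ['x','x','x',':','/','/'] ['h','t','t','p',':','/','/'] _]
  rw [pvRep_block 'h' ['x','x','p',':','/','/'] ['h','t','t','p',':','/','/'] (blk := ['h','t','t','p',':','/','/']) (pvChk_sound (by decide)) _]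
  rw [pvRep_block 'h' ['x','x','x','x',':','/','/'] ['h','t','t','p','s',':','/','/'] (blk := ['h','t','t','p',':','/','/']) (pvChk_sound (by decide)) _]
  rw [pvRep_block 'h' ['x','x','p','s',':','/','/'] ['h','t','t','p','s',':','/','/'] (blk := ['h','t','t','p',':','/','/']) (pvChk_sound (by decide)) _]
  rw [pvRep_block 'h' ['x','x','x','s',':','/','/'] ['h','t','t','p','s',':','/','/'] (blk := ['h','t','t','p',':','/','/']) (pvChk_sound (by decide)) _]

lemma pvChain_tok3 (u : List Char) :
    pvChain (['h','x','x','p',':','/','/'] ++ u) = ['h','t','t','p',':','/','/'] ++ pvChain u := by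
  unfold pvChain
  rw [pvRep_block '[' ['.',']'] ['.'] (blk := ['h','x','x','p',':','/','/']) (pvChk_sound (by decide)) _]
  rw [pvRep_block 'h' ['x','x','x',':','/','/'] ['h','t','t','p',':','/','/'] (blk := ['h','x','x','p',':','/','/']) (pvChk_sound (by decide)) _]
  rw [pvRep_pos 'h' ['x','x','p',':','/','/'] ['h','t','t','p',':','/','/'] _]
  rw [pvRep_block 'h' ['x','x','x','x',':','/','/'] ['h','t','t','p','s',':','/','/'] (blk := ['h','t','t','p',':','/','/']) (pvChk_sound (by decide)) _]
  rw [pvRep_block 'h' ['x','x','p','s',':','/','/'] ['h','t','t','p','s',':','/','/'] (blk := ['h','t','t','p',':','/','/']) (pvChk_sound (by decide)) _]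
  rw [pvRep_block 'h' ['x','x','x','s',':','/','/'] ['h','t','t','p','s',':','/','/'] (blk := ['h','t','t','p',':','/','/']) (pvChk_sound (by decide)) _]

lemma pvChain_tok4 (u : List Char) :
    pvChain (['h','x','x','x','x',':','/','/'] ++ u) = ['h','t','t','p','s',':','/','/'] ++ pvChain u := by
  unfold pvChain
  rw [pvRep_block '[' ['.',']'] ['.'] (blk := ['h','x','x','x','x',':','/','/']) (pvChk_sound (by decide)) _]
  rw [pvRep_block 'h' ['x','x','x',':','/','/'] ['h','t','t','p',':','/','/'] (blk := ['h','x','x','x','x',':','/','/']) (pvChk_sound (by decide)) _]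
  rw [pvRep_block 'h' ['x','x','p',':','/','/'] ['h','t','t','p',':','/','/'] (blk := ['h','x','x','x','x',':','/','/']) (pvChk_sound (by decide)) _]
  rw [pvRep_pos 'h' ['x','x','x','x',':','/','/'] ['h','t','t','p','s',':','/','/'] _]
  rw [pvRep_block 'h' ['x','x','p','s',':','/','/'] ['h','t','t','p','s',':','/','/'] (blk := ['h','t','t','p','s',':','/','/']) (pvChk_sound (by decide)) _]
  rw [pvRep_block 'h' ['x','x','x','s',':','/','/'] ['h','t','t','p','s',':','/','/'] (blk := ['h','t','t','p','s',':','/','/']) (pvChk_sound (by decide)) _]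

lemma pvChain_tok5 (u : List Char) :
    pvChain (['h','x','x','p','s',':','/','/'] ++ u) = ['h','t','t','p','s',':','/','/'] ++ pvChain u := by
  unfold pvChain
  rw [pvRep_block '[' ['.',']'] ['.'] (blk := ['h','x','x','p','s',':','/','/']) (pvChk_sound (by decide)) _]
  rw [pvRep_block 'h' ['x','x','x',':','/','/'] ['h','t','t','p',':','/','/'] (blk := ['h','x','x','p','s',':','/','/']) (pvChk_sound (by decide)) _]
  rw [pvRep_block 'h' ['x','x','p',':','/','/'] ['h','t','t','p',':','/','/'] (blk := ['h','x','x','p','s',':','/','/']) (pvChk_sound (by decide)) _]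
  rw [pvRep_block 'h' ['x','x','x','x',':','/','/'] ['h','t','t','p','s',':','/','/'] (blk := ['h','x','x','p','s',':','/','/']) (pvChk_sound (by decide)) _]
  rw [pvRep_pos 'h' ['x','x','p','s',':','/','/'] ['h','t','t','p','s',':','/','/'] _]
  rw [pvRep_block 'h' ['x','x','x','s',':','/','/'] ['h','t','t','p','s',':','/','/'] (blk := ['h','t','t','p','s',':','/','/']) (pvChk_sound (by decide)) _]

lemma pvChain_tok6 (u : List Char) :
    pvChain (['h','x','x','x','s',':','/','/'] ++ u) = ['h','t','t','p','s',':','/','/'] ++ pvChain u := by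
  unfold pvChain
  rw [pvRep_block '[' ['.',']'] ['.'] (blk := ['h','x','x','x','s',':','/','/']) (pvChk_sound (by decide)) _]
  rw [pvRep_block 'h' ['x','x','x',':','/','/'] ['h','t','t','p',':','/','/'] (blk := ['h','x','x','x','s',':','/','/']) (pvChk_sound (by decide)) _]
  rw [pvRep_block 'h' ['x','x','p',':','/','/'] ['h','t','t','p',':','/','/'] (blk := ['h','x','x','x','s',':','/','/']) (pvChk_sound (by decide)) _]
  rw [pvRep_block 'h' ['x','x','x','x',':','/','/'] ['h','t','t','p','s',':','/','/'] (blk := ['h','x','x','x','s',':','/','/']) (pvChk_sound (by decide)) _]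
  rw [pvRep_block 'h' ['x','x','p','s',':','/','/'] ['h','t','t','p','s',':','/','/'] (blk := ['h','x','x','x','s',':','/','/']) (pvChk_sound (by decide)) _]
  rw [pvRep_pos 'h' ['x','x','x','s',':','/','/'] ['h','t','t','p','s',':','/','/'] _]

lemma pvChain_head (c : Char) (t : List Char)
    (h1 : ¬ ['[','.',']'] <+: (c :: t))
    (h2 : ¬ ['h','x','x','x',':','/','/'] <+: (c :: t))
    (h3 : ¬ ['h','x','x','p',':','/','/'] <+: (c :: t))
    (h4 : ¬ ['h','x','x','x','x',':','/','/'] <+: (c :: t))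
    (h5 : ¬ ['h','x','x','p','s',':','/','/'] <+: (c :: t))
    (h6 : ¬ ['h','x','x','x','s',':','/','/'] <+: (c :: t))
    : pvChain (c :: t) = c :: pvChain t := by
  have n2 : ¬ ['h','x','x','x',':','/','/'] <+: (c :: (pvRep '[' ['.',']'] ['.'] t)) := by
    intro hp
    obtain ⟨hc, hw⟩ := List.cons_prefix_cons.mp hp
    subst hc
    have hw0 : ¬ ['x','x','x',':','/','/'] <+: t := fun hx => h2 (List.cons_prefix_cons.mpr ⟨rfl, hx⟩)
    have hh2_1 : ¬ ['x','x','x',':','/','/'] <+: pvRep '[' ['.',']'] ['.'] t :=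
      pvRep_noCreate '[' ['.',']'] '.' [] t ['x','x','x',':','/','/'] (by decide) (by decide) hw0
    exact hh2_1 hw
  have n3 : ¬ ['h','x','x','p',':','/','/'] <+: (c :: (pvRep 'h' ['x','x','x',':','/','/'] ['h','t','t','p',':','/','/'] (pvRep '[' ['.',']'] ['.'] t))) := by
    intro hp
    obtain ⟨hc, hw⟩ := List.cons_prefix_cons.mp hp
    subst hc
    have hw0 : ¬ ['x','x','p',':','/','/'] <+: t := fun hx => h3 (List.cons_prefix_cons.mpr ⟨rfl, hx⟩)
    have hh3_1 : ¬ ['x','x','p',':','/','/'] <+: pvRep '[' ['.',']'] ['.'] t :=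
      pvRep_noCreate '[' ['.',']'] '.' [] t ['x','x','p',':','/','/'] (by decide) (by decide) hw0
    have hh3_2 : ¬ ['x','x','p',':','/','/'] <+: pvRep 'h' ['x','x','x',':','/','/'] ['h','t','t','p',':','/','/'] (pvRep '[' ['.',']'] ['.'] t) :=
      pvRep_noCreate 'h' ['x','x','x',':','/','/'] 'h' ['t','t','p',':','/','/'] (pvRep '[' ['.',']'] ['.'] t) ['x','x','p',':','/','/'] (by decide) (by decide) hh3_1
    exact hh3_2 hw
  have n4 : ¬ ['h','x','x','x','x',':','/','/'] <+: (c :: (pvRep 'h' ['x','x','p',':','/','/'] ['h','t','t','p',':','/','/'] (pvRep 'h' ['x','x','x',':','/','/'] ['h','t','t','p',':','/','/'] (pvRep '[' ['.',']'] ['.'] t)))) := by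
    intro hp
    obtain ⟨hc, hw⟩ := List.cons_prefix_cons.mp hp
    subst hc
    have hw0 : ¬ ['x','x','x','x',':','/','/'] <+: t := fun hx => h4 (List.cons_prefix_cons.mpr ⟨rfl, hx⟩)
    have hh4_1 : ¬ ['x','x','x','x',':','/','/'] <+: pvRep '[' ['.',']'] ['.'] t :=
      pvRep_noCreate '[' ['.',']'] '.' [] t ['x','x','x','x',':','/','/'] (by decide) (by decide) hw0
    have hh4_2 : ¬ ['x','x','x','x',':','/','/'] <+: pvRep 'h' ['x','x','x',':','/','/'] ['h','t','t','p',':','/','/'] (pvRep '[' ['.',']'] ['.'] t) :=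
      pvRep_noCreate 'h' ['x','x','x',':','/','/'] 'h' ['t','t','p',':','/','/'] (pvRep '[' ['.',']'] ['.'] t) ['x','x','x','x',':','/','/'] (by decide) (by decide) hh4_1
    have hh4_3 : ¬ ['x','x','x','x',':','/','/'] <+: pvRep 'h' ['x','x','p',':','/','/'] ['h','t','t','p',':','/','/'] (pvRep 'h' ['x','x','x',':','/','/'] ['h','t','t','p',':','/','/'] (pvRep '[' ['.',']'] ['.'] t)) :=
      pvRep_noCreate 'h' ['x','x','p',':','/','/'] 'h' ['t','t','p',':','/','/'] (pvRep 'h' ['x','x','x',':','/','/'] ['h','t','t','p',':','/','/'] (pvRep '[' ['.',']'] ['.'] t)) ['x','x','x','x',':','/','/'] (by decide) (by decide) hh4_2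
    exact hh4_3 hw
  have n5 : ¬ ['h','x','x','p','s',':','/','/'] <+: (c :: (pvRep 'h' ['x','x','x','x',':','/','/'] ['h','t','t','p','s',':','/','/'] (pvRep 'h' ['x','x','p',':','/','/'] ['h','t','t','p',':','/','/'] (pvRep 'h' ['x','x','x',':','/','/'] ['h','t','t','p',':','/','/'] (pvRep '[' ['.',']'] ['.'] t))))) := by
    intro hp
    obtain ⟨hc, hw⟩ := List.cons_prefix_cons.mp hp
    subst hc
    have hw0 : ¬ ['x','x','p','s',':','/','/'] <+: t := fun hx => h5 (List.cons_prefix_cons.mpr ⟨rfl, hx⟩)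
    have hh5_1 : ¬ ['x','x','p','s',':','/','/'] <+: pvRep '[' ['.',']'] ['.'] t :=
      pvRep_noCreate '[' ['.',']'] '.' [] t ['x','x','p','s',':','/','/'] (by decide) (by decide) hw0
    have hh5_2 : ¬ ['x','x','p','s',':','/','/'] <+: pvRep 'h' ['x','x','x',':','/','/'] ['h','t','t','p',':','/','/'] (pvRep '[' ['.',']'] ['.'] t) :=
      pvRep_noCreate 'h' ['x','x','x',':','/','/'] 'h' ['t','t','p',':','/','/'] (pvRep '[' ['.',']'] ['.'] t) ['x','x','p','s',':','/','/'] (by decide) (by decide) hh5_1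
    have hh5_3 : ¬ ['x','x','p','s',':','/','/'] <+: pvRep 'h' ['x','x','p',':','/','/'] ['h','t','t','p',':','/','/'] (pvRep 'h' ['x','x','x',':','/','/'] ['h','t','t','p',':','/','/'] (pvRep '[' ['.',']'] ['.'] t)) :=
      pvRep_noCreate 'h' ['x','x','p',':','/','/'] 'h' ['t','t','p',':','/','/'] (pvRep 'h' ['x','x','x',':','/','/'] ['h','t','t','p',':','/','/'] (pvRep '[' ['.',']'] ['.'] t)) ['x','x','p','s',':','/','/'] (by decide) (by decide) hh5_2
    have hh5_4 : ¬ ['x','x','p','s',':','/','/'] <+: pvRep 'h' ['x','x','x','x',':','/','/'] ['h','t','t','p','s',':','/','/'] (pvRep 'h' ['x','x','p',':','/','/'] ['h','t','t','p',':','/','/'] (pvRep 'h' ['x','x','x',':','/','/'] ['h','t','t','p',':','/','/'] (pvRep '[' ['.',']'] ['.'] t))) :=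
      pvRep_noCreate 'h' ['x','x','x','x',':','/','/'] 'h' ['t','t','p','s',':','/','/'] (pvRep 'h' ['x','x','p',':','/','/'] ['h','t','t','p',':','/','/'] (pvRep 'h' ['x','x','x',':','/','/'] ['h','t','t','p',':','/','/'] (pvRep '[' ['.',']'] ['.'] t))) ['x','x','p','s',':','/','/'] (by decide) (by decide) hh5_3
    exact hh5_4 hw
  have n6 : ¬ ['h','x','x','x','s',':','/','/'] <+: (c :: (pvRep 'h' ['x','x','p','s',':','/','/'] ['h','t','t','p','s',':','/','/'] (pvRep 'h' ['x','x','x','x',':','/','/'] ['h','t','t','p','s',':','/','/'] (pvRep 'h' ['x','x','p',':','/','/'] ['h','t','t','p',':','/','/'] (pvRep 'h' ['x','x','x',':','/','/'] ['h','t','t','p',':','/','/'] (pvRep '[' ['.',']'] ['.'] t)))))) := by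
    intro hp
    obtain ⟨hc, hw⟩ := List.cons_prefix_cons.mp hp
    subst hc
    have hw0 : ¬ ['x','x','x','s',':','/','/'] <+: t := fun hx => h6 (List.cons_prefix_cons.mpr ⟨rfl, hx⟩)
    have hh6_1 : ¬ ['x','x','x','s',':','/','/'] <+: pvRep '[' ['.',']'] ['.'] t :=
      pvRep_noCreate '[' ['.',']'] '.' [] t ['x','x','x','s',':','/','/'] (by decide) (by decide) hw0
    have hh6_2 : ¬ ['x','x','x','s',':','/','/'] <+: pvRep 'h' ['x','x','x',':','/','/'] ['h','t','t','p',':','/','/'] (pvRep '[' ['.',']'] ['.'] t) :=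
      pvRep_noCreate 'h' ['x','x','x',':','/','/'] 'h' ['t','t','p',':','/','/'] (pvRep '[' ['.',']'] ['.'] t) ['x','x','x','s',':','/','/'] (by decide) (by decide) hh6_1
    have hh6_3 : ¬ ['x','x','x','s',':','/','/'] <+: pvRep 'h' ['x','x','p',':','/','/'] ['h','t','t','p',':','/','/'] (pvRep 'h' ['x','x','x',':','/','/'] ['h','t','t','p',':','/','/'] (pvRep '[' ['.',']'] ['.'] t)) :=
      pvRep_noCreate 'h' ['x','x','p',':','/','/'] 'h' ['t','t','p',':','/','/'] (pvRep 'h' ['x','x','x',':','/','/'] ['h','t','t','p',':','/','/'] (pvRep '[' ['.',']'] ['.'] t)) ['x','x','x','s',':','/','/'] (by decide) (by decide) hh6_2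
    have hh6_4 : ¬ ['x','x','x','s',':','/','/'] <+: pvRep 'h' ['x','x','x','x',':','/','/'] ['h','t','t','p','s',':','/','/'] (pvRep 'h' ['x','x','p',':','/','/'] ['h','t','t','p',':','/','/'] (pvRep 'h' ['x','x','x',':','/','/'] ['h','t','t','p',':','/','/'] (pvRep '[' ['.',']'] ['.'] t))) :=
      pvRep_noCreate 'h' ['x','x','x','x',':','/','/'] 'h' ['t','t','p','s',':','/','/'] (pvRep 'h' ['x','x','p',':','/','/'] ['h','t','t','p',':','/','/'] (pvRep 'h' ['x','x','x',':','/','/'] ['h','t','t','p',':','/','/'] (pvRep '[' ['.',']'] ['.'] t))) ['x','x','x','s',':','/','/'] (by decide) (by decide) hh6_3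
    have hh6_5 : ¬ ['x','x','x','s',':','/','/'] <+: pvRep 'h' ['x','x','p','s',':','/','/'] ['h','t','t','p','s',':','/','/'] (pvRep 'h' ['x','x','x','x',':','/','/'] ['h','t','t','p','s',':','/','/'] (pvRep 'h' ['x','x','p',':','/','/'] ['h','t','t','p',':','/','/'] (pvRep 'h' ['x','x','x',':','/','/'] ['h','t','t','p',':','/','/'] (pvRep '[' ['.',']'] ['.'] t)))) :=
      pvRep_noCreate 'h' ['x','x','p','s',':','/','/'] 'h' ['t','t','p','s',':','/','/'] (pvRep 'h' ['x','x','x','x',':','/','/'] ['h','t','t','p','s',':','/','/'] (pvRep 'h' ['x','x','p',':','/','/'] ['h','t','t','p',':','/','/'] (pvRep 'h' ['x','x','x',':','/','/'] ['h','t','t','p',':','/','/'] (pvRep '[' ['.',']'] ['.'] t)))) ['x','x','x','s',':','/','/'] (by decide) (by decide) hh6_4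
    exact hh6_5 hw
  unfold pvChain
  rw [pvRep_neg _ _ _ _ _ h1]
  rw [pvRep_neg _ _ _ _ _ n2]
  rw [pvRep_neg _ _ _ _ _ n3]
  rw [pvRep_neg _ _ _ _ _ n4]
  rw [pvRep_neg _ _ _ _ _ n5]
  rw [pvRep_neg _ _ _ _ _ n6]

lemma pvStep_eq (o n : String) (o0 : Char) (orest : List Char) (ho : o.toList = o0 :: orest)
    (v : String) :
    (if PySem.Str.isIn o v then PySem.Str.replace v o n else v) =
      String.ofList (pvRep o0 orest n.toList v.toList) := by
  cases h : PySem.Str.isIn o v with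
  | false =>
    rw [if_neg (by simp [h])]
    rw [PySem.Str.isIn_eq, ho] at h
    rw [pvRep_id o0 orest n.toList v.toList ((PySem.Chars.isIn_eq_false_iff _ _).mp h)]
    exact (String.ofList_toList (s := v)).symm
  | true =>
    rw [if_pos (by simp [h])]
    apply String.toList_inj.mp
    rw [PySem.Str.toList_replace, ho, pvReplace_eq, String.toList_ofList]

lemma pvDefang_toList (v : String) : (defang_py v).toList = pvChain v.toList := by
  simp only [defang_py, pvDefangTypes, List.foldl_cons, List.foldl_nil]
  rw [pvStep_eq "[.]" "." '[' ['.',']'] (by decide) v]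
  rw [pvStep_eq "hxxx://" "http://" 'h' ['x','x','x',':','/','/'] (by decide) _]
  rw [pvStep_eq "hxxp://" "http://" 'h' ['x','x','p',':','/','/'] (by decide) _]
  rw [pvStep_eq "hxxxx://" "https://" 'h' ['x','x','x','x',':','/','/'] (by decide) _]
  rw [pvStep_eq "hxxps://" "https://" 'h' ['x','x','p','s',':','/','/'] (by decide) _]
  rw [pvStep_eq "hxxxs://" "https://" 'h' ['x','x','x','s',':','/','/'] (by decide) _]
  simp only [String.toList_ofList]
  rw [show (".".toList : List Char) = ['.'] from by decide,
      show ("http://".toList : List Char) = ['h','t','t','p',':','/','/'] from by decide,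
      show ("https://".toList : List Char) = ['h','t','t','p','s',':','/','/'] from by decide]
  rfl

lemma pvChain_eq_scan : ∀ n s, s.length ≤ n → pvChain s = pvScan s := by
  intro n
  induction n with
  | zero =>
    intro s hs
    have : s = [] := List.eq_nil_of_length_eq_zero (Nat.le_zero.mp hs)
    subst this
    rw [pvScan_nil]
    simp [pvChain, pvRep_nil]
  | succ n ih =>
    intro s hs
    match s with
    | [] => rw [pvScan_nil]; simp [pvChain, pvRep_nil]
    | c :: t =>
      by_cases h1 : ['[','.',']'] <+: (c :: t)
      · have hf : pvMapping.find? (fun p => p.1.isPrefixOf (c :: t)) = some (['[','.',']'], ['.']) := by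
          rw [pvMapping_lit]
          exact List.find?_cons_of_pos (p := fun p : List Char × List Char => p.1.isPrefixOf (c :: t)) (List.isPrefixOf_iff_prefix.mpr h1)
        rw [pvScan_some hf]
        obtain ⟨u, hu⟩ := h1
        have hlen : u.length ≤ n := by
          have := congrArg List.length hu
          simp at this hs
          omega
        rw [← hu, pvChain_tok1 u, List.drop_left, ih u hlen]
      by_cases h2 : ['h','x','x','x',':','/','/'] <+: (c :: t)
      · have hf : pvMapping.find? (fun p => p.1.isPrefixOf (c :: t)) = some (['h','x','x','x',':','/','/'], ['h','t','t','p',':','/','/']) := by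
          rw [pvMapping_lit]
          rw [List.find?_cons_of_neg (p := fun p : List Char × List Char => p.1.isPrefixOf (c :: t)) (fun hx => h1 (List.isPrefixOf_iff_prefix.mp hx))]
          exact List.find?_cons_of_pos (p := fun p : List Char × List Char => p.1.isPrefixOf (c :: t)) (List.isPrefixOf_iff_prefix.mpr h2)
        rw [pvScan_some hf]
        obtain ⟨u, hu⟩ := h2
        have hlen : u.length ≤ n := by
          have := congrArg List.length hu
          simp at this hs
          omega
        rw [← hu, pvChain_tok2 u, List.drop_left, ih u hlen]
      by_cases h3 : ['h','x','x','p',':','/','/'] <+: (c :: t)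
      · have hf : pvMapping.find? (fun p => p.1.isPrefixOf (c :: t)) = some (['h','x','x','p',':','/','/'], ['h','t','t','p',':','/','/']) := by
          rw [pvMapping_lit]
          rw [List.find?_cons_of_neg (p := fun p : List Char × List Char => p.1.isPrefixOf (c :: t)) (fun hx => h1 (List.isPrefixOf_iff_prefix.mp hx))]
          rw [List.find?_cons_of_neg (p := fun p : List Char × List Char => p.1.isPrefixOf (c :: t)) (fun hx => h2 (List.isPrefixOf_iff_prefix.mp hx))]
          exact List.find?_cons_of_pos (p := fun p : List Char × List Char => p.1.isPrefixOf (c :: t)) (List.isPrefixOf_iff_prefix.mpr h3)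
        rw [pvScan_some hf]
        obtain ⟨u, hu⟩ := h3
        have hlen : u.length ≤ n := by
          have := congrArg List.length hu
          simp at this hs
          omega
        rw [← hu, pvChain_tok3 u, List.drop_left, ih u hlen]
      by_cases h4 : ['h','x','x','x','x',':','/','/'] <+: (c :: t)
      · have hf : pvMapping.find? (fun p => p.1.isPrefixOf (c :: t)) = some (['h','x','x','x','x',':','/','/'], ['h','t','t','p','s',':','/','/']) := by
          rw [pvMapping_lit]
          rw [List.find?_cons_of_neg (p := fun p : List Char × List Char => p.1.isPrefixOf (c :: t)) (fun hx => h1 (List.isPrefixOf_iff_prefix.mp hx))]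
          rw [List.find?_cons_of_neg (p := fun p : List Char × List Char => p.1.isPrefixOf (c :: t)) (fun hx => h2 (List.isPrefixOf_iff_prefix.mp hx))]
          rw [List.find?_cons_of_neg (p := fun p : List Char × List Char => p.1.isPrefixOf (c :: t)) (fun hx => h3 (List.isPrefixOf_iff_prefix.mp hx))]
          exact List.find?_cons_of_pos (p := fun p : List Char × List Char => p.1.isPrefixOf (c :: t)) (List.isPrefixOf_iff_prefix.mpr h4)
        rw [pvScan_some hf]
        obtain ⟨u, hu⟩ := h4
        have hlen : u.length ≤ n := by
          have := congrArg List.length hu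
          simp at this hs
          omega
        rw [← hu, pvChain_tok4 u, List.drop_left, ih u hlen]
      by_cases h5 : ['h','x','x','p','s',':','/','/'] <+: (c :: t)
      · have hf : pvMapping.find? (fun p => p.1.isPrefixOf (c :: t)) = some (['h','x','x','p','s',':','/','/'], ['h','t','t','p','s',':','/','/']) := by
          rw [pvMapping_lit]
          rw [List.find?_cons_of_neg (p := fun p : List Char × List Char => p.1.isPrefixOf (c :: t)) (fun hx => h1 (List.isPrefixOf_iff_prefix.mp hx))]
          rw [List.find?_cons_of_neg (p := fun p : List Char × List Char => p.1.isPrefixOf (c :: t)) (fun hx => h2 (List.isPrefixOf_iff_prefix.mp hx))]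
          rw [List.find?_cons_of_neg (p := fun p : List Char × List Char => p.1.isPrefixOf (c :: t)) (fun hx => h3 (List.isPrefixOf_iff_prefix.mp hx))]
          rw [List.find?_cons_of_neg (p := fun p : List Char × List Char => p.1.isPrefixOf (c :: t)) (fun hx => h4 (List.isPrefixOf_iff_prefix.mp hx))]
          exact List.find?_cons_of_pos (p := fun p : List Char × List Char => p.1.isPrefixOf (c :: t)) (List.isPrefixOf_iff_prefix.mpr h5)
        rw [pvScan_some hf]
        obtain ⟨u, hu⟩ := h5
        have hlen : u.length ≤ n := by
          have := congrArg List.length hu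
          simp at this hs
          omega
        rw [← hu, pvChain_tok5 u, List.drop_left, ih u hlen]
      by_cases h6 : ['h','x','x','x','s',':','/','/'] <+: (c :: t)
      · have hf : pvMapping.find? (fun p => p.1.isPrefixOf (c :: t)) = some (['h','x','x','x','s',':','/','/'], ['h','t','t','p','s',':','/','/']) := by
          rw [pvMapping_lit]
          rw [List.find?_cons_of_neg (p := fun p : List Char × List Char => p.1.isPrefixOf (c :: t)) (fun hx => h1 (List.isPrefixOf_iff_prefix.mp hx))]
          rw [List.find?_cons_of_neg (p := fun p : List Char × List Char => p.1.isPrefixOf (c :: t)) (fun hx => h2 (List.isPrefixOf_iff_prefix.mp hx))]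
          rw [List.find?_cons_of_neg (p := fun p : List Char × List Char => p.1.isPrefixOf (c :: t)) (fun hx => h3 (List.isPrefixOf_iff_prefix.mp hx))]
          rw [List.find?_cons_of_neg (p := fun p : List Char × List Char => p.1.isPrefixOf (c :: t)) (fun hx => h4 (List.isPrefixOf_iff_prefix.mp hx))]
          rw [List.find?_cons_of_neg (p := fun p : List Char × List Char => p.1.isPrefixOf (c :: t)) (fun hx => h5 (List.isPrefixOf_iff_prefix.mp hx))]
          exact List.find?_cons_of_pos (p := fun p : List Char × List Char => p.1.isPrefixOf (c :: t)) (List.isPrefixOf_iff_prefix.mpr h6)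
        rw [pvScan_some hf]
        obtain ⟨u, hu⟩ := h6
        have hlen : u.length ≤ n := by
          have := congrArg List.length hu
          simp at this hs
          omega
        rw [← hu, pvChain_tok6 u, List.drop_left, ih u hlen]
      -- no token matches at this position
      have hf : pvMapping.find? (fun p => p.1.isPrefixOf (c :: t)) = none := by
        rw [pvMapping_lit]
        rw [List.find?_cons_of_neg (p := fun p : List Char × List Char => p.1.isPrefixOf (c :: t)) (fun hx => h1 (List.isPrefixOf_iff_prefix.mp hx))]
        rw [List.find?_cons_of_neg (p := fun p : List Char × List Char => p.1.isPrefixOf (c :: t)) (fun hx => h2 (List.isPrefixOf_iff_prefix.mp hx))]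
        rw [List.find?_cons_of_neg (p := fun p : List Char × List Char => p.1.isPrefixOf (c :: t)) (fun hx => h3 (List.isPrefixOf_iff_prefix.mp hx))]
        rw [List.find?_cons_of_neg (p := fun p : List Char × List Char => p.1.isPrefixOf (c :: t)) (fun hx => h4 (List.isPrefixOf_iff_prefix.mp hx))]
        rw [List.find?_cons_of_neg (p := fun p : List Char × List Char => p.1.isPrefixOf (c :: t)) (fun hx => h5 (List.isPrefixOf_iff_prefix.mp hx))]
        rw [List.find?_cons_of_neg (p := fun p : List Char × List Char => p.1.isPrefixOf (c :: t)) (fun hx => h6 (List.isPrefixOf_iff_prefix.mp hx))]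
        rfl
      rw [pvScan_none hf, pvChain_head c t h1 h2 h3 h4 h5 h6]
      rw [ih t (by simp at hs; omega)]

-- ===== VERDICT (by name: the statement is the Claim_ definition above) =====
theorem defang_py_spec : Claim_equal_defang_py := by
  intro value _
  unfold Spec_defang_py defang_py_alt
  apply String.toList_inj.mp
  rw [pvDefang_toList, String.toList_ofList, pvChain_eq_scan value.toList.length _ le_rfl]
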